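-- pv_equiv track=rewrite | github.com/Mohitbishukarma/30-days-of-Python-Coding | day1/caseSortFunction.py | caseSort
-- ===== SOURCE A (Python) =====
-- def caseSort(text:str):
--     lowerLtr=''
--     upperLtr=''
--     for i in text:
--         if i.islower():
--             lowerLtr+=i
--         else:
--             upperLtr+=i
--     return lowerLtr+upperLtr
-- ===== SOURCE B (Python) =====
-- def caseSort(text: str):
--     return ''.join(sorted(text, key=lambda c: not c.islower()))
-- ===== Notes on version B (the rewrite author's own statement) =====
-- stated objective: idiomatic
-- what changed: Replaces the two-accumulator partition loop by a single stable sort with a binary key (lowercase first), whose stability reproduces each group's original order.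
import Mathlib
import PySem

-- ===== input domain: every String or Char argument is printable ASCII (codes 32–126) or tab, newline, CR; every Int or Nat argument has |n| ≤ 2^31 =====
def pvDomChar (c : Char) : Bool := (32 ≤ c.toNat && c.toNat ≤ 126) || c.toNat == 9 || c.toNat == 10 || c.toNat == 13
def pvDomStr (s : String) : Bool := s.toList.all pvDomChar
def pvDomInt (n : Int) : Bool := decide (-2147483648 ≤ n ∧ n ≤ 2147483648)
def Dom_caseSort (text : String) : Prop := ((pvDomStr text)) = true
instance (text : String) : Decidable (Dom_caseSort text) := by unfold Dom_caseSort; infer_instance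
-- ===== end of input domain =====

-- B replaces A's two-accumulator partition loop by one stable sort with a binary key
-- (lowercase first); sort stability keeps each group's original order (objective: idiomatic).


-- ===== PORT A =====
-- for i in text: islower → append to lowerLtr else upperLtr; return lowerLtr+upperLtr
def caseSort (text : String) : String :=
  let r := text.toList.foldl
    (fun (acc : String × String) i =>
      if PySem.Chars.islower i then (acc.1.push i, acc.2) else (acc.1, acc.2.push i))
    ("", "")
  r.1 ++ r.2

-- ===== PORT B =====
-- ''.join(sorted(text, key=lambda c: not c.islower()))
def caseSort_alt (text : String) : String :=
  String.ofList (PySem.List.sorted text.toList (fun c => !PySem.Chars.islower c) false)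

-- ===== PRECONDITION & SPEC =====
def Spec_caseSort (text : String) (out : String) : Prop := out = caseSort_alt text
instance (text : String) (out : String) : Decidable (Spec_caseSort text out) := by unfold Spec_caseSort; infer_instance

-- ===== CLAIM (what is proved, stated in full; the proofs are below) =====
def Claim_equal_caseSort : Prop := ∀ (text : String), Dom_caseSort text → Spec_caseSort text (caseSort text)

-- ===== LEMMAS AND PROOFS =====

-- the comparison used by B's stable insertion sort
def csBefore (a b : Char) : Bool := decide ((!PySem.Chars.islower a) < (!PySem.Chars.islower b))

theorem csBefore_low_low {a b : Char} (ha : PySem.Chars.islower a = true)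
    (hb : PySem.Chars.islower b = true) : csBefore a b = false := by
  simp [csBefore, ha, hb]

theorem csBefore_low_high {a b : Char} (ha : PySem.Chars.islower a = true)
    (hb : PySem.Chars.islower b = false) : csBefore a b = true := by
  simp [csBefore, ha, hb]

theorem csBefore_high {a b : Char} (ha : PySem.Chars.islower a = false) :
    csBefore a b = false := by
  simp [csBefore, ha]

-- inserting an element that never goes before anything appends it
theorem insertBy_append {x : Char} (l : List Char)
    (h : ∀ y ∈ l, csBefore x y = false) :
    PySem.List.insertBy csBefore x l = l ++ [x] := by
  induction l with
  | nil => rfl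
  | cons y t ih =>
    have hy := h y (by simp)
    simp [PySem.List.insertBy, hy, ih (fun z hz => h z (by simp [hz]))]

-- inserting a lowercase char lands exactly between the low block and the high block
theorem insertBy_mid {x : Char} (L H : List Char)
    (hL : ∀ y ∈ L, csBefore x y = false) (hH : ∀ y ∈ H, csBefore x y = true) :
    PySem.List.insertBy csBefore x (L ++ H) = L ++ x :: H := by
  induction L with
  | nil =>
    cases H with
    | nil => rfl
    | cons h t => simp [PySem.List.insertBy, hH h (by simp)]
  | cons y t ih =>
    have hy := hL y (by simp)
    simp [PySem.List.insertBy, hy, ih (fun z hz => hL z (by simp [hz]))]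

-- invariant for B's sort loop: a low-block/high-block accumulator stays partitioned
theorem sort_loop_invariant (xs : List Char) :
    ∀ (L H : List Char), (∀ c ∈ L, PySem.Chars.islower c = true) →
    (∀ c ∈ H, PySem.Chars.islower c = false) →
    xs.foldl (fun acc x => PySem.List.insertBy csBefore x acc) (L ++ H)
      = (L ++ xs.filter (fun c => PySem.Chars.islower c))
        ++ (H ++ xs.filter (fun c => !PySem.Chars.islower c)) := by
  induction xs with
  | nil => intro L H _ _; simp
  | cons x t ih =>
    intro L H hL hH
    by_cases hx : PySem.Chars.islower x = true
    · have hstep : PySem.List.insertBy csBefore x (L ++ H) = (L ++ [x]) ++ H := by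
        rw [insertBy_mid L H (fun y hy => csBefore_low_low hx (hL y hy))
          (fun y hy => csBefore_low_high hx (hH y hy))]
        simp
      have := ih (L ++ [x]) H
        (by intro c hc; rcases List.mem_append.mp hc with h | h
            · exact hL c h
            · simp at h; simpa [h] using hx) hH
      simp only [List.foldl_cons, hstep, this, hx, List.filter_cons]
      simp
    · have hx' : PySem.Chars.islower x = false := by simpa using hx
      have hstep : PySem.List.insertBy csBefore x (L ++ H) = L ++ (H ++ [x]) := by
        rw [insertBy_append (L ++ H)
          (by intro y hy; exact csBefore_high hx')]
        simp
      have := ih L (H ++ [x]) hL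
        (by intro c hc; rcases List.mem_append.mp hc with h | h
            · exact hH c h
            · simp at h; simpa [h] using hx')
      simp only [List.foldl_cons, hstep, this, hx', List.filter_cons]
      simp

-- B's sort is the two filters concatenated
theorem sorted_eq_filters (xs : List Char) :
    PySem.List.sorted xs (fun c => !PySem.Chars.islower c) false
      = xs.filter (fun c => PySem.Chars.islower c)
        ++ xs.filter (fun c => !PySem.Chars.islower c) := by
  have h := sort_loop_invariant xs [] [] (by simp) (by simp)
  simpa [PySem.List.sorted, csBefore] using h

-- A's accumulator pair, read back as lists
theorem a_loop_invariant (xs : List Char) :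
    ∀ (p : String × String),
    (xs.foldl (fun (acc : String × String) i =>
        if PySem.Chars.islower i then (acc.1.push i, acc.2) else (acc.1, acc.2.push i)) p)
      = (String.ofList (p.1.toList ++ xs.filter (fun c => PySem.Chars.islower c)),
         String.ofList (p.2.toList ++ xs.filter (fun c => !PySem.Chars.islower c))) := by
  induction xs with
  | nil => intro p; simp
  | cons x t ih =>
    intro p
    by_cases hx : PySem.Chars.islower x = true
    · rw [List.foldl_cons]
      simp only [hx, if_true, ih, List.filter_cons, Bool.not_true]
      simp
    · have hx' : PySem.Chars.islower x = false := by simpa using hx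
      rw [List.foldl_cons]
      simp only [hx', if_false, Bool.false_eq_true, ih, List.filter_cons, Bool.not_false]
      simp

-- ===== VERDICT (by name: the statement is the Claim_ definition above) =====
theorem caseSort_spec : Claim_equal_caseSort := by
  intro text _
  unfold Spec_caseSort caseSort caseSort_alt
  rw [a_loop_invariant, sorted_eq_filters]
  apply String.ext
  simp
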